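-- pv_equiv track=rewrite | github.com/rightthumb/rightthumb-widgets-v0 | widgets/python/replaceFunction.py | getTabs
-- ===== SOURCE A (Python) =====
-- def getTabs( line ):
-- 	pre = ''
-- 	for ch in str(line):
-- 		if ch == ' ' or ch == '\t':
-- 			pre += ch
-- 		else:
-- 			return pre
-- 	return pre
-- ===== SOURCE B (Python) =====
-- def getTabs(line):
--     s = str(line)
--     return s[:len(s) - len(s.lstrip(' \t'))]
-- ===== Notes on version B (the rewrite author's own statement) =====
-- stated objective: idiomatic
-- what changed: Replaced the character-by-character loop with early return by computing the prefix length as the difference between the full length and the length after lstrip with the space/tab charset, then slicing once.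
import Mathlib
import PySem

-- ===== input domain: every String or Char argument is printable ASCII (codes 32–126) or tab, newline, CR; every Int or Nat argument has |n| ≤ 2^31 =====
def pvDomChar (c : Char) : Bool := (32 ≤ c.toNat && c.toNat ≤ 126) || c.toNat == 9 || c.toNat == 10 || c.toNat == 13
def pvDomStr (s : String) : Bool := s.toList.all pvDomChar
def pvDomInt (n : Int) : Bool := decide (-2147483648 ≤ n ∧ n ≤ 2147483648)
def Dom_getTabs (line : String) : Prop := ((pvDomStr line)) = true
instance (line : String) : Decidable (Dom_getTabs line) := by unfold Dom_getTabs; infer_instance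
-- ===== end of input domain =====

-- B computes the leading ' '/'\t' prefix via len(s) - len(s.lstrip(' \t')) and one slice, instead of A's accumulator loop with early return (idiomatic, same cost).

-- ===== PORT A =====
-- literal port of A: iterate characters, accumulate spaces/tabs, return early otherwise
def getTabsGo (cs : List Char) (pre : List Char) : List Char :=
  match cs with
  | [] => pre
  | c :: rest => if c == ' ' || c == '\t' then getTabsGo rest (pre ++ [c]) else pre

def getTabs (line : String) : String :=
  String.ofList (getTabsGo line.toList [])

-- ===== PORT B =====
-- s.lstrip(' \t') ported by hand as dropWhile over the char list (exact: lstrip with an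
-- explicit char set drops exactly the leading chars from that set)
def getTabs_alt (line : String) : String :=
  let s := line.toList
  String.ofList (s.take (s.length - (s.dropWhile (fun c => c == ' ' || c == '\t')).length))

-- ===== PRECONDITION & SPEC =====
def Spec_getTabs (line : String) (out : String) : Prop := out = getTabs_alt line
instance (line : String) (out : String) : Decidable (Spec_getTabs line out) := by unfold Spec_getTabs; infer_instance

-- ===== CLAIM (what is proved, stated in full; the proofs are below) =====
def Claim_equal_getTabs : Prop := ∀ (line : String), Dom_getTabs line → Spec_getTabs line (getTabs line)

-- ===== LEMMAS AND PROOFS =====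
theorem getTabsGo_eq (cs : List Char) (pre : List Char) :
    getTabsGo cs pre = pre ++ cs.takeWhile (fun c => c == ' ' || c == '\t') := by
  induction cs generalizing pre with
  | nil => simp [getTabsGo]
  | cons c rest ih =>
    simp only [getTabsGo, List.takeWhile]
    by_cases h : (c == ' ' || c == '\t') = true
    · simp [h, ih]
    · simp [h]

theorem take_sub_dropWhile (p : Char → Bool) (s : List Char) :
    s.take (s.length - (s.dropWhile p).length) = s.takeWhile p := by
  have hp := List.takeWhile_append_dropWhile (p := p) (l := s)
  have hlen : s.length = (s.takeWhile p).length + (s.dropWhile p).length := by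
    conv_lhs => rw [← hp]
    exact List.length_append
  rw [hlen, Nat.add_sub_cancel]
  exact (List.prefix_iff_eq_take.mp (List.takeWhile_prefix p)).symm

-- ===== VERDICT (by name: the statement is the Claim_ definition above) =====
theorem getTabs_spec : Claim_equal_getTabs := by
  intro line _
  unfold Spec_getTabs getTabs getTabs_alt
  simp only [getTabsGo_eq, List.nil_append, take_sub_dropWhile]
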